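-- pv_equiv track=rewrite | github.com/terry960302/Python-Algorithms | 스터디 7.21/프로그래머스 레벨3 '최고의 집합' - 복사본 - 복사본 - 복사본 - 복사본.py | solution
-- ===== SOURCE A (Python) =====
-- def solution(n, s):
--     from itertools import combinations as com
--
--     L=[i for i in range(1, s+1)]
--     M=[]
--     if (n*(n+1))/2 > s: #1,2,3...,n의 합보다 s가 작다면
--         return [-1]
--     else:
--         for j in com(L,n):
--             if sum(j)==s:
--                 M.append(j)
--     return list(M[-1])
-- ===== SOURCE B (Python) =====
-- def solution(n, s):
--     # Greedy: lexicographically largest n distinct positive integers summing to s, O(n).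
--     if n * (n + 1) > 2 * s:
--         return [-1]
--     res = []
--     rem = s
--     for k in range(n, 0, -1):
--         a = (rem - k * (k - 1) // 2) // k
--         res.append(a)
--         rem -= a
--     return res
-- ===== Notes on version B (the rewrite author's own statement) =====
-- stated objective: faster
-- what changed: Replaced brute-force enumeration of all C(s,n) combinations of 1..s (taking the last one summing to s) by an O(n) greedy that picks each next element as the floor-average of the remaining sum, which is exactly the lexicographically largest valid combination.
-- outside the precondition, e.g. on solution(-1, 0): A raises ValueError, B returns []; on solution(0, 3): A raises IndexError, B returns []
import Mathlib
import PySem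

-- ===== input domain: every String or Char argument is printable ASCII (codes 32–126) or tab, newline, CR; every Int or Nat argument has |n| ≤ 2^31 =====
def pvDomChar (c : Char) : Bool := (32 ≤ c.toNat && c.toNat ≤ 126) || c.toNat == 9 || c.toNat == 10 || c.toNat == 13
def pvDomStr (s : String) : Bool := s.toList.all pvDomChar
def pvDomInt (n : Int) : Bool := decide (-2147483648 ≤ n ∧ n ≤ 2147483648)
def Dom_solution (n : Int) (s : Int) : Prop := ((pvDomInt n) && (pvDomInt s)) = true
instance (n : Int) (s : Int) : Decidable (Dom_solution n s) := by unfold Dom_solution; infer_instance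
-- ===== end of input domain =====

-- B replaces A's enumeration of all n-combinations of 1..s (returning the last one summing
-- to s) by an O(n) greedy construction of that same lexicographically largest combination.

-- ===== PORT A =====
-- itertools.combinations xs r, in itertools order (tuples containing the head come first)
def combs : List Int → Nat → List (List Int)
  | _, 0 => [[]]
  | [], _ + 1 => []
  | x :: xs, r + 1 => ((combs xs r).map (x :: ·)) ++ combs xs (r + 1)

def solution (n : Int) (s : Int) : List Int :=
  -- Python compares the float (n*(n+1))/2 with s; on Dom (|n|,|s| ≤ 2^31) this float
  -- comparison is exact wherever it could flip, so it is ported as 2*s < n*(n+1).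
  if 2 * s < n * (n + 1) then [-1]
  else
    let L := PySem.List.pyRange 1 (s + 1) 1
    let M := (combs L n.toNat).filter (fun j => j.sum == s)
    M.getLast?.getD []   -- M[-1]; M = [] (IndexError) is excluded by Pre_solution

-- ===== PORT B =====
def altStep (st : List Int × Int) (k : Int) : List Int × Int :=
  let a := PySem.Int.floordiv (st.2 - PySem.Int.floordiv (k * (k - 1)) 2) k
  (st.1 ++ [a], st.2 - a)

def solution_alt (n : Int) (s : Int) : List Int :=
  if n * (n + 1) > 2 * s then [-1]
  else ((PySem.List.pyRange n 0 (-1)).foldl altStep ([], s)).1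

-- ===== PRECONDITION & SPEC =====
-- Pre_ excludes exactly the inputs where A raises: n < 0 with a reachable loop
-- (combinations raises ValueError) and n = 0 with s > 0 (M is empty, M[-1] raises IndexError).
def Pre_solution (n : Int) (s : Int) : Prop :=
  1 ≤ n ∨ (n = 0 ∧ s = 0) ∨ 2 * s < n * (n + 1)
instance (n : Int) (s : Int) : Decidable (Pre_solution n s) := by unfold Pre_solution; infer_instance

def pvWitness_solution : Int × Int := (2, 5)

def Spec_solution (n : Int) (s : Int) (out : List Int) : Prop := out = solution_alt n s
instance (n : Int) (s : Int) (out : List Int) : Decidable (Spec_solution n s out) := by unfold Spec_solution; infer_instance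

-- ===== CLAIM (what is proved, stated in full; the proofs are below) =====
def Claim_equal_solution : Prop := ∀ (n : Int) (s : Int), Dom_solution n s → Pre_solution n s → Spec_solution n s (solution n s)

-- ===== LEMMAS AND PROOFS =====

-- ----- arithmetic helpers -----
-- tri k = 0 + 1 + ... + (k-1)
def tri : Nat → Int
  | 0 => 0
  | k + 1 => tri k + k

lemma two_tri (k : Nat) : 2 * tri k = (k : Int) * ((k : Int) - 1) := by
  induction k with
  | zero => simp [tri]
  | succ k ih => simp only [tri]; push_cast; linear_combination ih

-- the greedy list: k values summing to rem, lexicographically largest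
def gl : Nat → Int → List Int
  | 0, _ => []
  | k + 1, rem =>
    let a := (rem - tri (k + 1)) / ((k : Int) + 1)
    a :: gl k (rem - a)

-- interval [lo, lo+1, ..., lo+len-1]
def ivl (lo : Int) : Nat → List Int
  | 0 => []
  | len + 1 => lo :: ivl (lo + 1) len

-- last combination of ivl lo len choose k with sum t, computed by the structural recursion
def G : Int → Nat → Nat → Int → Option (List Int)
  | _, _, 0, t => if t = 0 then some [] else none
  | _, 0, _ + 1, _ => none
  | lo, len + 1, k + 1, t =>
    match G (lo + 1) len (k + 1) t with
    | some c => some c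
    | none => (G (lo + 1) len k (t - lo)).map (lo :: ·)

-- feasibility: a strictly increasing k-tuple from ivl lo len with sum t exists
def feas (lo : Int) (len k : Nat) (t : Int) : Prop :=
  k ≤ len ∧ (k : Int) * lo + tri k ≤ t ∧ t ≤ (k : Int) * (lo + len) - tri k - k

lemma combs_zero (xs : List Int) : combs xs 0 = [[]] := by cases xs <;> rfl

lemma filter_map_cons (x t : Int) (l : List (List Int)) :
    ((l.map (x :: ·)).filter (fun j => j.sum == t)) =
      (l.filter (fun j => j.sum == t - x)).map (x :: ·) := by
  rw [List.filter_map]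
  congr 1
  refine List.filter_congr (fun j _ => ?_)
  simp only [Function.comp, List.sum_cons]
  rcases eq_or_ne j.sum (t - x) with h | h
  · simp [h, show x + (t - x) = t from by ring]
  · have h1 : x + j.sum ≠ t := by omega
    simp [h, h1]

-- core: the last sum-t combination A computes over an interval IS G
lemma lastFilter (len : Nat) : ∀ (lo : Int) (k : Nat) (t : Int),
    ((combs (ivl lo len) k).filter (fun j => j.sum == t)).getLast? = G lo len k t := by
  induction len with
  | zero =>
    intro lo k t
    cases k with
    | zero =>
      rcases eq_or_ne t 0 with h | h
      · simp [ivl, combs_zero, G, h]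
      · simp [ivl, combs_zero, G, h, Ne.symm h]
    | succ k => simp [ivl, combs, G]
  | succ len ih =>
    intro lo k t
    cases k with
    | zero =>
      rcases eq_or_ne t 0 with h | h
      · simp [combs_zero, G, h]
      · simp [combs_zero, G, h, Ne.symm h]
    | succ k =>
      have hstep : combs (ivl lo (len + 1)) (k + 1)
          = ((combs (ivl (lo + 1) len) k).map (lo :: ·)) ++ combs (ivl (lo + 1) len) (k + 1) := rfl
      rw [hstep, List.filter_append, List.getLast?_append, filter_map_cons,
        List.getLast?_map, ih, ih]
      cases hG : G (lo + 1) len (k + 1) t <;> simp [G, hG]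

-- the arithmetic split of feasibility along the structural recursion
lemma feas_split (lo : Int) (len k : Nat) (t : Int) :
    feas lo (len + 1) (k + 1) t ↔ feas (lo + 1) len (k + 1) t ∨ feas (lo + 1) len k (t - lo) := by
  have htri : 2 * tri k = (k : Int) * k - k := by
    have := two_tri k; ring_nf at this ⊢; linarith
  constructor
  · rintro ⟨h1, h2, h3⟩
    have h1' : k ≤ len := by omega
    simp only [tri] at h2 h3
    push_cast at h2 h3
    by_cases hA : k + 1 ≤ len ∧ ((k : Int) + 1) * (lo + 1) + tri (k + 1) ≤ t
    · left
      refine ⟨hA.1, hA.2, ?_⟩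
      simp only [tri]; push_cast; nlinarith [htri]
    · right
      refine ⟨h1', ?_, ?_⟩
      · push_cast; nlinarith [htri]
      · push_cast
        rcases Nat.lt_or_ge len (k + 1) with hl | hl
        · have hlen : (len : Int) = (k : Int) := by omega
          rw [hlen] at h3 ⊢
          nlinarith [htri]
        · have hl' : (k : Int) + 1 ≤ (len : Int) := by exact_mod_cast hl
          have hlow : ¬ (((k : Int) + 1) * (lo + 1) + tri (k + 1) ≤ t) := fun hc => hA ⟨hl, hc⟩
          simp only [tri] at hlow
          push_cast at hlow
          rw [not_le] at hlow
          have hKlen : (k : Int) * ((k : Int) + 1) ≤ (k : Int) * len :=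
            mul_le_mul_of_nonneg_left hl' (Int.natCast_nonneg k)
          nlinarith [htri, hKlen]
  · rintro (⟨h1, h2, h3⟩ | ⟨h1, h2, h3⟩)
    · refine ⟨by omega, ?_, ?_⟩
      · simp only [tri] at h2 ⊢; push_cast at h2 ⊢
        nlinarith [Int.natCast_nonneg k]
      · simp only [tri] at h3 ⊢; push_cast at h3 ⊢; nlinarith []
    · refine ⟨by omega, ?_, ?_⟩
      · simp only [tri] at h2 ⊢; push_cast at h2 ⊢; nlinarith []
      · have hl : (k : Int) ≤ (len : Int) := by exact_mod_cast h1
        simp only [tri] at h3 ⊢; push_cast at h3 ⊢; nlinarith []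

lemma G_none_iff (len : Nat) : ∀ (lo : Int) (k : Nat) (t : Int),
    G lo len k t = none ↔ ¬ feas lo len k t := by
  induction len with
  | zero =>
    intro lo k t
    cases k with
    | zero =>
      simp only [G, feas, tri]
      rcases eq_or_ne t 0 with h | h <;> simp [h] <;> omega
    | succ k => simp [G, feas]
  | succ len ih =>
    intro lo k t
    cases k with
    | zero =>
      simp only [G, feas, tri]
      rcases eq_or_ne t 0 with h | h <;> simp [h] <;> omega
    | succ k =>
      rw [feas_split]
      cases hG : G (lo + 1) len (k + 1) t with
      | some c =>
        have hf : feas (lo + 1) len (k + 1) t := by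
          by_contra hf; rw [← ih] at hf; rw [hf] at hG; cases hG
        simp [G, hG]
        tauto
      | none =>
        have h1 : ¬ feas (lo + 1) len (k + 1) t := (ih _ _ _).mp hG
        have h2 := ih (lo + 1) k (t - lo)
        simp only [G, hG, Option.map_eq_none_iff]
        rw [h2]
        tauto

lemma G_feas (len : Nat) : ∀ (lo : Int) (k : Nat) (t : Int),
    feas lo len k t → G lo len k t = some (gl k t) := by
  induction len with
  | zero =>
    intro lo k t hf
    rcases hf with ⟨h1, h2, h3⟩
    have hk : k = 0 := by omega
    subst hk
    simp only [feas, tri] at h2 h3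
    have ht : t = 0 := by simp at h2 h3; omega
    simp [G, gl, ht]
  | succ len ih =>
    intro lo k t hf
    cases k with
    | zero =>
      rcases hf with ⟨_, h2, h3⟩
      simp only [tri] at h2 h3
      have ht : t = 0 := by simp at h2 h3; omega
      simp [G, gl, ht]
    | succ k =>
      cases hG : G (lo + 1) len (k + 1) t with
      | some c =>
        have hfA : feas (lo + 1) len (k + 1) t := by
          by_contra hfA
          rw [← G_none_iff] at hfA
          rw [hfA] at hG; cases hG
        have h := ih (lo + 1) (k + 1) t hfA
        rw [hG] at h
        simp [G, hG, h]
      | none =>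
        have hfA : ¬ feas (lo + 1) len (k + 1) t := (G_none_iff _ _ _ _).mp hG
        have hfB : feas (lo + 1) len k (t - lo) := by
          rcases (feas_split lo len k t).mp hf with h | h
          · exact absurd h hfA
          · exact h
        have hrec := ih (lo + 1) k (t - lo) hfB
        -- the greedy head is exactly lo here
        have hK0 : (0 : Int) < (k : Int) + 1 := by positivity
        have hlow : ((k : Int) + 1) * lo + tri (k + 1) ≤ t := hf.2.1
        have hhigh : t < ((k : Int) + 1) * (lo + 1) + tri (k + 1) := by
          rcases hf with ⟨h1, h2, h3⟩
          by_contra hc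
          rw [not_lt] at hc
          rcases Nat.lt_or_ge len (k + 1) with hl | hl
          · -- len = k : the whole interval is forced, its sum is the lower bound
            have hlen : (len : Int) = (k : Int) := by omega
            have htri : 2 * tri k = (k : Int) * k - k := by
              have := two_tri k; ring_nf at this ⊢; linarith
            simp only [tri] at h3 hc
            push_cast at h3 hc
            rw [hlen] at h3
            nlinarith [htri]
          · refine hfA ⟨hl, ?_, ?_⟩
            · exact hc
            · simp only [tri] at h3 ⊢
              push_cast at h3 ⊢
              linarith
        have hdiv : (t - tri (k + 1)) / ((k : Int) + 1) = lo := by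
          have hge : lo ≤ (t - tri (k + 1)) / ((k : Int) + 1) := by
            rw [Int.le_ediv_iff_mul_le hK0]
            linarith [hlow]
          have hlt : (t - tri (k + 1)) / ((k : Int) + 1) < lo + 1 := by
            rw [Int.ediv_lt_iff_lt_mul hK0]
            linarith [hhigh]
          omega
        have hgl : gl (k + 1) t = lo :: gl k (t - lo) := by
          simp only [gl, hdiv]
        simp [G, hG, hrec, hgl]

lemma alt_loop (k : Nat) : ∀ (rem : Int) (acc : List Int),
    ((PySem.List.pyRange (k : Int) 0 (-1)).foldl altStep (acc, rem)).1 = acc ++ gl k rem := by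
  induction k with
  | zero =>
    intro rem acc
    rw [show ((0 : Nat) : Int) = 0 from rfl, PySem.List.pyRange_neg_one_eq_nil le_rfl]
    simp [gl]
  | succ k ih =>
    intro rem acc
    have hcons : PySem.List.pyRange (((k : Nat) + 1 : Nat) : Int) 0 (-1)
        = ((k : Int) + 1) :: PySem.List.pyRange ((k : Int) + 1 - 1) 0 (-1) := by
      push_cast
      exact PySem.List.pyRange_neg_one_cons (by positivity)
    rw [hcons]
    have hstep : altStep (acc, rem) ((k : Int) + 1)
        = (acc ++ [(rem - tri (k + 1)) / ((k : Int) + 1)], rem - (rem - tri (k + 1)) / ((k : Int) + 1)) := by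
      have hfd2 : PySem.Int.floordiv (((k : Int) + 1) * ((k : Int) + 1 - 1)) 2 = tri (k + 1) := by
        have h : ((k : Int) + 1) * ((k : Int) + 1 - 1) = 2 * tri (k + 1) := by
          have := two_tri (k + 1); push_cast at this; linarith
        rw [h, PySem.Int.floordiv_eq_ediv_of_pos (by norm_num)]
        exact Int.mul_ediv_cancel_left _ (by norm_num)
      simp only [altStep, hfd2, PySem.Int.floordiv_eq_ediv_of_pos
        (show (0 : Int) < (k : Int) + 1 by positivity)]
    rw [List.foldl_cons, hstep]
    have h1 : (k : Int) + 1 - 1 = ((k : Nat) : Int) := by push_cast; ring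
    rw [h1, ih]
    simp [gl]

lemma pyRange_ivl : ∀ (len : Nat) (lo : Int),
    PySem.List.pyRange lo (lo + (len : Int)) 1 = ivl lo len := by
  intro len
  induction len with
  | zero => intro lo; rw [show lo + ((0 : Nat) : Int) = lo by simp]
            exact PySem.List.pyRange_one_eq_nil le_rfl
  | succ len ih =>
    intro lo
    rw [PySem.List.pyRange_one_cons (by push_cast; omega)]
    have h : lo + (((len : Nat) + 1 : Nat) : Int) = (lo + 1) + ((len : Nat) : Int) := by
      push_cast; ring
    rw [h, ih]
    rfl

-- ===== VERDICT (by name: the statement is the Claim_ definition above) =====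
theorem solution_spec : Claim_equal_solution := by
  intro n s _ hp
  unfold Spec_solution
  by_cases hc : 2 * s < n * (n + 1)
  · simp [solution, solution_alt, hc]
  · have h2s : n * (n + 1) ≤ 2 * s := not_lt.mp hc
    rcases hp with hn | ⟨hn, hs⟩ | h
    · -- 1 ≤ n : the main case
      have hn0 : 0 ≤ n := by linarith
      have hN : ((n.toNat : Nat) : Int) = n := Int.toNat_of_nonneg hn0
      have hs0 : 0 ≤ s := by nlinarith
      have hS : ((s.toNat : Nat) : Int) = s := Int.toNat_of_nonneg hs0
      have htri : 2 * tri n.toNat = n * (n - 1) := by rw [two_tri, hN]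
      have hns : n ≤ s := by nlinarith
      have hfeas : feas 1 s.toNat n.toNat s := by
        refine ⟨?_, ?_, ?_⟩
        · omega
        · rw [hN]; nlinarith [htri]
        · rw [hN, hS]
          nlinarith [htri, mul_nonneg (show (0 : Int) ≤ n - 1 by linarith)
            (show (0 : Int) ≤ 2 * s - n by nlinarith)]
      have hL : PySem.List.pyRange 1 (s + 1) 1 = ivl 1 s.toNat := by
        have h : s + 1 = 1 + ((s.toNat : Nat) : Int) := by omega
        rw [h, pyRange_ivl]
      have hA : solution n s = gl n.toNat s := by
        unfold solution
        rw [if_neg hc]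
        show ((combs (PySem.List.pyRange 1 (s + 1) 1) n.toNat).filter
          (fun j => j.sum == s)).getLast?.getD [] = _
        rw [hL, lastFilter, G_feas _ _ _ _ hfeas]
        rfl
      have hB : solution_alt n s = gl n.toNat s := by
        unfold solution_alt
        rw [if_neg hc]
        show ((PySem.List.pyRange n 0 (-1)).foldl altStep ([], s)).1 = _
        rw [← hN, alt_loop]
        rfl
      rw [hA, hB]
    · subst hn; subst hs; decide
    · exact absurd h hc
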